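-- pv_equiv track=rewrite | github.com/Gauravs-2k/FedPrivLoRA | app/lora/lora.py | _prepare_hr
-- ===== SOURCE A (Python) =====
-- from typing import Callable, Dict, Optional
--
-- def _prepare_hr(example: Dict[str, object]) -> Dict[str, str]:
--     conversation = example.get("messages") or []
--     segments = []
--     response = ""
--     for message in conversation:
--         role = message.get("role")
--         content = (message.get("content") or "").strip()
--         if role == "assistant":
--             response = content
--             break
--         label = "System" if role == "system" else "User"
--         segments.append(f"{label}: {content}")
--     prompt = "\n".join(segments)
--     return {"prompt": prompt, "response": response}
-- ===== SOURCE B (Python) =====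
-- def _prepare_hr(example):
--     conversation = example.get("messages") or []
--     idx = next((i for i, m in enumerate(conversation)
--                 if m.get("role") == "assistant"), len(conversation))
--     prompt = "\n".join(
--         ("System" if m.get("role") == "system" else "User")
--         + ": " + (m.get("content") or "").strip()
--         for m in conversation[:idx]
--     )
--     response = (conversation[idx].get("content") or "").strip() if idx < len(conversation) else ""
--     return {"prompt": prompt, "response": response}
-- ===== Notes on version B (the rewrite author's own statement) =====
-- stated objective: alternative
-- what changed: Replaces A's fused accumulate-and-break loop by a split-then-build pass: first locate the first assistant message, then map the prefix to labelled lines and take the response from the located message.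
import Mathlib
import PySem

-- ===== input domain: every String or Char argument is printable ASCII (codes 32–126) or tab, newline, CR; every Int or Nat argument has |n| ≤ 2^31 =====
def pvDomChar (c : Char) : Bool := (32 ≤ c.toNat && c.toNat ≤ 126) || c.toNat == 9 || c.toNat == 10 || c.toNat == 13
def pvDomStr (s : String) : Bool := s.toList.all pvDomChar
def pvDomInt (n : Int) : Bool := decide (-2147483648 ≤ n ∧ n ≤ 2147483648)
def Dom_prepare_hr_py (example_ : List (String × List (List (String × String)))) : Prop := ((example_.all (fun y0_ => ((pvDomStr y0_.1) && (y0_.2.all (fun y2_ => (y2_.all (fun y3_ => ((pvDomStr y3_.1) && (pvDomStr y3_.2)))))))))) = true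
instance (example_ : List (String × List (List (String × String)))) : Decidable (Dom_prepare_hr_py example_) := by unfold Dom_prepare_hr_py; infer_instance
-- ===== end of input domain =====

-- B builds the same dict by split-then-build (find the first assistant message, then map the
-- prefix) instead of A's fused accumulate-and-break loop; return values are proved equal.

-- ===== PORT A =====
-- the for-loop of A: carries the growing segments list, breaks on the first assistant message
def prepareHrLoopA : List (List (String × String)) → List String → List String × String
  | [], segments => (segments, "")
  | message :: rest, segments =>
    let role := List.lookup "role" message
    let content := PySem.Str.strip ((List.lookup "content" message).getD "")
    if role = some "assistant" then (segments, content)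
    else
      let label := if role = some "system" then "System" else "User"
      prepareHrLoopA rest (segments ++ [label ++ ": " ++ content])

def prepare_hr_py (example_ : List (String × List (List (String × String)))) : List (String × String) :=
  let conversation := (List.lookup "messages" example_).getD []
  let (segments, response) := prepareHrLoopA conversation []
  [("prompt", PySem.Str.join "\n" segments), ("response", response)]

-- ===== PORT B =====
def prepareHrIsAssistant (m : List (String × String)) : Bool :=
  List.lookup "role" m == some "assistant"

def prepareHrFmt (m : List (String × String)) : String :=
  (if List.lookup "role" m = some "system" then "System" else "User")
    ++ ": " ++ PySem.Str.strip ((List.lookup "content" m).getD "")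

def prepare_hr_py_alt (example_ : List (String × List (List (String × String)))) : List (String × String) :=
  let conversation := (List.lookup "messages" example_).getD []
  let prefix_ := conversation.takeWhile (fun m => !prepareHrIsAssistant m)
  let prompt := PySem.Str.join "\n" (prefix_.map prepareHrFmt)
  let response :=
    match conversation.find? prepareHrIsAssistant with
    | some m => PySem.Str.strip ((List.lookup "content" m).getD "")
    | none => ""
  [("prompt", prompt), ("response", response)]

-- ===== PRECONDITION & SPEC =====
def Spec_prepare_hr_py (example_ : List (String × List (List (String × String)))) (out : List (String × String)) : Prop := out = prepare_hr_py_alt example_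
instance (example_ : List (String × List (List (String × String)))) (out : List (String × String)) : Decidable (Spec_prepare_hr_py example_ out) := by unfold Spec_prepare_hr_py; infer_instance

-- ===== CLAIM (what is proved, stated in full; the proofs are below) =====
def Claim_equal_prepare_hr_py : Prop := ∀ (example_ : List (String × List (List (String × String)))), Dom_prepare_hr_py example_ → Spec_prepare_hr_py example_ (prepare_hr_py example_)

-- ===== LEMMAS AND PROOFS =====
lemma prepareHrLoopA_eq (conv : List (List (String × String))) (segments : List String) :
    prepareHrLoopA conv segments =
      (segments ++ (conv.takeWhile (fun m => !prepareHrIsAssistant m)).map prepareHrFmt,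
       match conv.find? prepareHrIsAssistant with
       | some m => PySem.Str.strip ((List.lookup "content" m).getD "")
       | none => "") := by
  induction conv generalizing segments with
  | nil => simp [prepareHrLoopA]
  | cons msg rest ih =>
    by_cases h : List.lookup "role" msg = some "assistant"
    · simp [prepareHrLoopA, h, prepareHrIsAssistant]
    · simp [prepareHrLoopA, h, prepareHrIsAssistant,
        prepareHrFmt, ih]

-- ===== VERDICT (by name: the statement is the Claim_ definition above) =====
theorem prepare_hr_py_spec : Claim_equal_prepare_hr_py := by
  intro example_ _
  unfold Spec_prepare_hr_py prepare_hr_py prepare_hr_py_alt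
  simp [prepareHrLoopA_eq]
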